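-- pv_equiv track=rewrite | github.com/edriessen/widm-bayes-model | _utils.py | get_max_data_per_episode_from_player_data
-- ===== SOURCE A (Python) =====
-- def get_max_data_per_episode_from_player_data(player_data):
--     episode_max_dict = {}
--
--     for player, player_dict in player_data.items():
--         for episode, episode_value in player_dict.items():
--             if episode not in episode_max_dict:
--                 episode_max_dict[episode] = 0
--             if episode_value > episode_max_dict[episode]:
--                 episode_max_dict[episode] = episode_value
--
--     return episode_max_dict
-- ===== SOURCE B (Python) =====
-- def get_max_data_per_episode_from_player_data(player_data):
--     index = {}
--     for player_dict in player_data.values():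
--         for episode, value in player_dict.items():
--             index.setdefault(episode, []).append(value)
--     return {episode: max(0, max(values)) for episode, values in index.items()}
-- ===== Notes on version B (the rewrite author's own statement) =====
-- stated objective: alternative
-- what changed: Replaces the interleaved scan-and-update of a running-max dict by two separate passes: first group all values per episode into an inverted index, then reduce each group with max(0, max(values)).
import Mathlib
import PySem

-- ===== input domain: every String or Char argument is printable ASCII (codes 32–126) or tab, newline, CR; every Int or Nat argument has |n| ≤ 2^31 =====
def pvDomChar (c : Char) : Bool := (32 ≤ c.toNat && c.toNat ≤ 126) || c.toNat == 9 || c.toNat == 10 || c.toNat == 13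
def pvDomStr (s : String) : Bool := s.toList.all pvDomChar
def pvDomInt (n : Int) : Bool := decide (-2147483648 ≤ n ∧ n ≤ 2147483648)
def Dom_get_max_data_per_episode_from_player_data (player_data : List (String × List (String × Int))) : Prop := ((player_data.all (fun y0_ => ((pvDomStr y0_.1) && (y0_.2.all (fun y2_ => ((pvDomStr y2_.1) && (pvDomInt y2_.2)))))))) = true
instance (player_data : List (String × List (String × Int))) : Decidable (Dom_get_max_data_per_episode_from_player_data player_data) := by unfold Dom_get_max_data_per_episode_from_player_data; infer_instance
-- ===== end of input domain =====

-- B separates the work into two passes — group every value under its episode into an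
-- inverted index, then reduce each group with max(0, max(values)) — instead of A's
-- interleaved scan that keeps a running max per episode (alternative decomposition, same cost).


-- ===== PORT A =====
def get_max_data_per_episode_from_player_data (player_data : List (String × List (String × Int))) : List (String × Int) :=
  -- episode_max_dict = {}; nested 'for' loops over players and their episode dicts
  (player_data.foldl (fun acc pp =>
      pp.2.foldl (fun d ev =>
        -- if episode not in episode_max_dict: episode_max_dict[episode] = 0
        let d1 := if d.contains ev.1 then d else d.insert ev.1 0
        -- if episode_value > episode_max_dict[episode]: episode_max_dict[episode] = episode_value
        if ev.2 > d1.getD ev.1 0 then d1.insert ev.1 ev.2 else d1) acc)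
    (PySem.Dict.empty : PySem.Dict String Int)).items

-- ===== PORT B =====
def get_max_data_per_episode_from_player_data_alt (player_data : List (String × List (String × Int))) : List (String × Int) :=
  -- pass 1: index.setdefault(episode, []).append(value)  (= modify episode [] (· ++ [value]), exact)
  (((player_data.foldl (fun idx pp =>
        pp.2.foldl (fun d ev => d.modify ev.1 [] (· ++ [ev.2])) idx)
      (PySem.Dict.empty : PySem.Dict String (List Int))).items).map
    -- pass 2: {episode: max(0, max(values)) …}; every group is nonempty by construction,
    -- so the .getD 0 default for max(values) (which would raise in Python on []) is unreachable
    (fun p => (p.1, max 0 ((PySem.List.max? p.2 (fun y => y)).getD 0))))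

-- ===== PRECONDITION & SPEC =====
def Spec_get_max_data_per_episode_from_player_data (player_data : List (String × List (String × Int))) (out : List (String × Int)) : Prop := out = get_max_data_per_episode_from_player_data_alt player_data
instance (player_data : List (String × List (String × Int))) (out : List (String × Int)) : Decidable (Spec_get_max_data_per_episode_from_player_data player_data out) := by unfold Spec_get_max_data_per_episode_from_player_data; infer_instance

-- ===== CLAIM (what is proved, stated in full; the proofs are below) =====
def Claim_equal_get_max_data_per_episode_from_player_data : Prop := ∀ (player_data : List (String × List (String × Int))), Dom_get_max_data_per_episode_from_player_data player_data → Spec_get_max_data_per_episode_from_player_data player_data (get_max_data_per_episode_from_player_data player_data)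

-- ===== LEMMAS AND PROOFS =====

-- A's per-pair update step
def pvStepA (d : PySem.Dict String Int) (ev : String × Int) : PySem.Dict String Int :=
  if ev.2 > (if d.contains ev.1 then d else d.insert ev.1 0).getD ev.1 0
  then (if d.contains ev.1 then d else d.insert ev.1 0).insert ev.1 ev.2
  else (if d.contains ev.1 then d else d.insert ev.1 0)

-- B's per-pair grouping step
def pvStepB (d : PySem.Dict String (List Int)) (ev : String × Int) : PySem.Dict String (List Int) :=
  d.modify ev.1 [] (· ++ [ev.2])

-- B's reduction of one group
def pvRed (vs : List Int) : Int := max 0 ((PySem.List.max? vs (fun y => y)).getD 0)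

lemma pvRed_eq_foldl (vs : List Int) : pvRed vs = vs.foldl max 0 := by
  cases vs with
  | nil => simp [pvRed, PySem.List.max?]
  | cons x t =>
      simp only [pvRed, PySem.List.max?_id_cons, Option.getD_some, List.foldl_cons]
      exact (List.foldl_assoc (op := max)).symm

-- the loop invariant tying A's running-max dict to B's inverted index
def pvInv (dA : PySem.Dict String Int) (dI : PySem.Dict String (List Int)) : Prop :=
  dA.keys = dI.keys ∧ dA.keys.Nodup ∧ ∀ k, dA.getD k 0 = (dI.getD k []).foldl max 0

lemma pvInv_step (dA : PySem.Dict String Int) (dI : PySem.Dict String (List Int))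
    (ev : String × Int) (h : pvInv dA dI) : pvInv (pvStepA dA ev) (pvStepB dI ev) := by
  obtain ⟨hk, hnd, hv⟩ := h
  have hc : dA.contains ev.1 = dI.contains ev.1 := by
    rw [PySem.Dict.contains_eq_decide_mem_keys, PySem.Dict.contains_eq_decide_mem_keys, hk]
  by_cases hcc : dA.contains ev.1 = true
  · -- episode already present in both dicts
    have hci : dI.contains ev.1 = true := hc ▸ hcc
    have hkeys : (pvStepA dA ev).keys = dA.keys := by
      simp only [pvStepA, hcc, if_true]
      split
      · exact PySem.Dict.keys_insert_of_contains _ _ hcc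
      · rfl
    refine ⟨?_, ?_, ?_⟩
    · rw [hkeys, pvStepB, PySem.Dict.keys_modify, PySem.Dict.keys_insert_of_contains _ _ hci, hk]
    · rw [hkeys]; exact hnd
    · intro k
      rw [pvStepB, PySem.Dict.getD_modify]
      simp only [pvStepA, hcc, if_true]
      by_cases hke : k = ev.1
      · subst hke
        rw [if_pos rfl, List.foldl_append, ← hv ev.1, List.foldl_cons, List.foldl_nil]
        split
        · rw [PySem.Dict.getD_insert, if_pos rfl]; omega
        · omega
      · rw [if_neg hke, ← hv k]
        split
        · rw [PySem.Dict.getD_insert, if_neg hke]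
        · rfl
  · -- new episode: appended to the end of both dicts
    simp only [Bool.not_eq_true] at hcc
    have hci : dI.contains ev.1 = false := hc ▸ hcc
    have hz : dA.getD ev.1 0 = 0 := PySem.Dict.getD_of_not_contains _ _ hcc
    have hk1 : (dA.insert ev.1 0).keys = dA.keys ++ [ev.1] :=
      PySem.Dict.keys_insert_of_not_contains _ _ hcc
    have hc1 : (dA.insert ev.1 0).contains ev.1 = true := by
      rw [PySem.Dict.contains_eq_decide_mem_keys, hk1]; simp
    have hkeys : (pvStepA dA ev).keys = dA.keys ++ [ev.1] := by
      simp only [pvStepA, hcc, Bool.false_eq_true, if_false]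
      split
      · rw [PySem.Dict.keys_insert_of_contains _ _ hc1, hk1]
      · exact hk1
    refine ⟨?_, ?_, ?_⟩
    · rw [hkeys, pvStepB, PySem.Dict.keys_modify, PySem.Dict.keys_insert_of_not_contains _ _ hci, hk]
    · rw [hkeys, hk]
      have : ev.1 ∉ dI.keys := by
        rw [PySem.Dict.contains_eq_decide_mem_keys] at hci
        simpa using hci
      rw [List.nodup_append]
      refine ⟨hk ▸ hnd, List.nodup_singleton _, ?_⟩
      intro a ha b hb
      simp only [List.mem_singleton] at hb
      subst hb
      exact fun e => this (e ▸ ha)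
    · intro k
      rw [pvStepB, PySem.Dict.getD_modify]
      simp only [pvStepA, hcc, Bool.false_eq_true, if_false]
      by_cases hke : k = ev.1
      · subst hke
        rw [if_pos rfl, List.foldl_append, ← hv ev.1, hz, List.foldl_cons, List.foldl_nil]
        have hg0 : (dA.insert ev.1 0).getD ev.1 0 = 0 := by
          rw [PySem.Dict.getD_insert, if_pos rfl]
        rw [hg0]
        split
        · rw [PySem.Dict.getD_insert, if_pos rfl]; omega
        · rw [hg0]; omega
      · rw [if_neg hke, ← hv k]
        have hgk : (dA.insert ev.1 0).getD k 0 = dA.getD k 0 := by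
          rw [PySem.Dict.getD_insert, if_neg hke]
        split
        · rw [PySem.Dict.getD_insert, if_neg hke, hgk]
        · exact hgk

lemma pvInv_foldl_inner (l : List (String × Int)) (dA : PySem.Dict String Int)
    (dI : PySem.Dict String (List Int)) (h : pvInv dA dI) :
    pvInv (l.foldl pvStepA dA) (l.foldl pvStepB dI) := by
  induction l generalizing dA dI with
  | nil => exact h
  | cons ev t ih => exact ih _ _ (pvInv_step _ _ _ h)

lemma pvInv_foldl_outer (l : List (String × List (String × Int)))
    (dA : PySem.Dict String Int) (dI : PySem.Dict String (List Int)) (h : pvInv dA dI) :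
    pvInv (l.foldl (fun d pp => pp.2.foldl pvStepA d) dA)
          (l.foldl (fun d pp => pp.2.foldl pvStepB d) dI) := by
  induction l generalizing dA dI with
  | nil => exact h
  | cons pp t ih => exact ih _ _ (pvInv_foldl_inner _ _ _ h)

-- ===== VERDICT (by name: the statement is the Claim_ definition above) =====
theorem get_max_data_per_episode_from_player_data_spec : Claim_equal_get_max_data_per_episode_from_player_data := by
  intro pd _
  show get_max_data_per_episode_from_player_data pd = get_max_data_per_episode_from_player_data_alt pd
  unfold get_max_data_per_episode_from_player_data get_max_data_per_episode_from_player_data_alt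
  have h0 : pvInv (PySem.Dict.empty : PySem.Dict String Int)
      (PySem.Dict.empty : PySem.Dict String (List Int)) := by
    refine ⟨by simp [PySem.Dict.keys_empty], by simp [PySem.Dict.keys_empty], fun k => by
      simp [PySem.Dict.getD_empty]⟩
  obtain ⟨hk, hnd, hv⟩ := pvInv_foldl_outer pd _ _ h0
  have hndI : ((pd.foldl (fun d pp => pp.2.foldl pvStepB d)
      (PySem.Dict.empty : PySem.Dict String (List Int)))).keys.Nodup := hk ▸ hnd
  show (pd.foldl (fun d pp => pp.2.foldl pvStepA d) PySem.Dict.empty).items =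
    ((pd.foldl (fun d pp => pp.2.foldl pvStepB d) PySem.Dict.empty).items).map
      (fun p => (p.1, pvRed p.2))
  rw [PySem.Dict.items_eq_map_keys _ hnd 0, PySem.Dict.items_eq_map_keys _ hndI [],
    List.map_map, hk]
  refine List.map_congr_left (fun k _ => ?_)
  simp only [Function.comp]
  rw [hv k, pvRed_eq_foldl]
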